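-- pv_equiv track=rewrite | github.com/mattwhitesides/CS5200 | Exam/Final/Zip/5/5b.py | build_graph_dict
-- ===== SOURCE A (Python) =====
-- def build_graph_dict(graph_data):
--     """
--     Builds a dictionary containing the labels in the graph.
--     ----------
--     Parameters
--         graph_data : [(int, int, int)]
--             The graph data to build the dict off of.
--     """
--     graph_dict = {}
--     graph_dict_rev = {}
--     i = 0
--
--     for x in graph_data:
--         if x[0] not in graph_dict:
--             graph_dict[x[0]] = i
--             graph_dict_rev[i] = x[0]
--             i += 1
--         if x[1] not in graph_dict:
--             graph_dict[x[1]] = i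
--             graph_dict_rev[i] = x[1]
--             i += 1
--
--     return (graph_dict, graph_dict_rev)
-- ===== SOURCE B (Python) =====
-- def build_graph_dict(graph_data):
--     labels = [v for x in graph_data for v in (x[0], x[1])]
--     unique = list(dict.fromkeys(labels))
--     graph_dict = {label: i for i, label in enumerate(unique)}
--     graph_dict_rev = {i: label for i, label in enumerate(unique)}
--     return (graph_dict, graph_dict_rev)
-- ===== Notes on version B (the rewrite author's own statement) =====
-- stated objective: simpler
-- what changed: Replaces the running counter with lockstep maintenance of two dicts by a flatten -> ordered dedup (dict.fromkeys) table built once, from which both maps are derived by enumerate comprehensions.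
import Mathlib
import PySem

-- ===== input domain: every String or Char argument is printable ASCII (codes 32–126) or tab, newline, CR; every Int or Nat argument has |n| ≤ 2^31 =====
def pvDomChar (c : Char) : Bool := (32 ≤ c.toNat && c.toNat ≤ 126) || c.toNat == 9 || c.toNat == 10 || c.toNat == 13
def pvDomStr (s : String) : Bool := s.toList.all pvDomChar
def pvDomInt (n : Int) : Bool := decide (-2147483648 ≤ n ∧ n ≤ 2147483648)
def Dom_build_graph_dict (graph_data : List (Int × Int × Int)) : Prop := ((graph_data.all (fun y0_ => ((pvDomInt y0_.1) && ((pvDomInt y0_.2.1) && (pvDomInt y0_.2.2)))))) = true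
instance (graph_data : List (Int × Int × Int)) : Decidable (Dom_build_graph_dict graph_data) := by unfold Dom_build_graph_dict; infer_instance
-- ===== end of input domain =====

-- B replaces A's running counter and lockstep dict maintenance with a flatten → ordered-dedup table
-- from which both maps are derived by enumeration (objective: simpler; same O(n) cost).

-- ===== PORT A =====
-- one 'if x[k] not in graph_dict: …' block of A's loop body (the body is this block applied to x[0], then to x[1])
def pvStep1 (st : PySem.Dict Int Int × PySem.Dict Int Int × Int) (v : Int) :
    PySem.Dict Int Int × PySem.Dict Int Int × Int :=
  if st.1.contains v = false then (st.1.insert v st.2.2, st.2.1.insert st.2.2 v, st.2.2 + 1) else st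

def build_graph_dict (graph_data : List (Int × Int × Int)) : (List (Int × Int)) × (List (Int × Int)) :=
  let r := graph_data.foldl (fun st x => pvStep1 (pvStep1 st x.1) x.2.1)
    (PySem.Dict.empty, PySem.Dict.empty, 0)
  (r.1.items, r.2.1.items)

-- ===== PORT B =====
def build_graph_dict_alt (graph_data : List (Int × Int × Int)) : (List (Int × Int)) × (List (Int × Int)) :=
  let labels := graph_data.flatMap (fun x => [x.1, x.2.1])
  let unique := PySem.List.dedup labels
  let graph_dict := (PySem.List.enumerate unique).foldl
    (fun d p => d.insert p.2 p.1) PySem.Dict.empty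
  let graph_dict_rev := (PySem.List.enumerate unique).foldl
    (fun d p => d.insert p.1 p.2) PySem.Dict.empty
  (graph_dict.items, graph_dict_rev.items)

-- ===== PRECONDITION & SPEC =====
def Spec_build_graph_dict (graph_data : List (Int × Int × Int)) (out : (List (Int × Int)) × (List (Int × Int))) : Prop := out = build_graph_dict_alt graph_data
instance (graph_data : List (Int × Int × Int)) (out : (List (Int × Int)) × (List (Int × Int))) : Decidable (Spec_build_graph_dict graph_data out) := by unfold Spec_build_graph_dict; infer_instance

-- ===== CLAIM (what is proved, stated in full; the proofs are below) =====
def Claim_equal_build_graph_dict : Prop := ∀ (graph_data : List (Int × Int × Int)), Dom_build_graph_dict graph_data → Spec_build_graph_dict graph_data (build_graph_dict graph_data)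

-- ===== LEMMAS AND PROOFS =====

-- A's loop state after the distinct labels seen so far are exactly the list L (in first-appearance order)
def pvStateOf (L : List Int) : PySem.Dict Int Int × PySem.Dict Int Int × Int :=
  (⟨(PySem.List.enumerate L 0).map (fun p => (p.2, p.1))⟩, ⟨PySem.List.enumerate L 0⟩, (L.length : Int))

lemma pv_any_snd (L : List Int) (v : Int) :
    ∀ s : Int, ((PySem.List.enumerate L s).any (fun q => q.2 == v)) = L.contains v := by
  induction L with
  | nil => intro s; simp [PySem.List.enumerate_nil]
  | cons x xs ih =>
    intro s
    simp only [PySem.List.enumerate_cons, List.any_cons, List.contains_cons, ih]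
    by_cases h : x = v
    · subst h; simp
    · have h1 : (x == v) = false := by simpa using h
      have h2 : (v == x) = false := by simpa using fun e => h e.symm
      simp [h1, h2]

lemma pv_any_fst_big (L : List Int) (t : Int) :
    ∀ s : Int, s + L.length ≤ t → ((PySem.List.enumerate L s).any (fun q => q.1 == t)) = false := by
  induction L with
  | nil => intro s _; simp [PySem.List.enumerate_nil]
  | cons x xs ih =>
    intro s hs
    simp only [List.length_cons] at hs
    have h1 : (s == t) = false := by
      have : s ≠ t := by omega
      simpa using this
    simp only [PySem.List.enumerate_cons, List.any_cons, h1, Bool.false_or]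
    exact ih (s + 1) (by omega)

lemma pv_step1_stateOf (L : List Int) (v : Int) :
    pvStep1 (pvStateOf L) v = pvStateOf (PySem.Set.add L v) := by
  have hc : (pvStateOf L).1.contains v = L.contains v := by
    simp only [pvStateOf, PySem.Dict.contains_mk, List.any_map]
    exact pv_any_snd L v 0
  by_cases h : v ∈ L
  · simp [pvStep1, PySem.Set.add, PySem.Set.contains, hc, h]
  · have hcf : L.contains v = false := by simpa using h
    have hd1 : (pvStateOf L).1.contains v = false := hc.trans hcf
    have hd2 : (pvStateOf L).2.1.contains ((L.length : Int)) = false := by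
      simp only [pvStateOf, PySem.Dict.contains_mk]
      exact pv_any_fst_big L _ 0 (by omega)
    have hadd : PySem.Set.add L v = L ++ [v] := by
      simp [PySem.Set.add, PySem.Set.contains, h]
    have e1 : (pvStateOf L).1.insert v (pvStateOf L).2.2
        = ⟨((PySem.List.enumerate L 0).map (fun p => (p.2, p.1))) ++ [(v, (L.length : Int))]⟩ := by
      rw [show ((pvStateOf L).1.insert v (pvStateOf L).2.2)
            = ⟨((pvStateOf L).1.insert v (pvStateOf L).2.2).items⟩ from rfl,
          PySem.Dict.items_insert_of_not_contains _ _ hd1]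
      simp [pvStateOf]
    have e2 : (pvStateOf L).2.1.insert (pvStateOf L).2.2 v
        = ⟨(PySem.List.enumerate L 0) ++ [((L.length : Int), v)]⟩ := by
      rw [show ((pvStateOf L).2.1.insert (pvStateOf L).2.2 v)
            = ⟨((pvStateOf L).2.1.insert ((L.length : Int)) v).items⟩ from rfl,
          PySem.Dict.items_insert_of_not_contains _ _ hd2]
      simp [pvStateOf]
    have e3 : pvStateOf (L ++ [v])
        = (⟨((PySem.List.enumerate L 0).map (fun p => (p.2, p.1))) ++ [(v, (L.length : Int))]⟩,
           ⟨(PySem.List.enumerate L 0) ++ [((L.length : Int), v)]⟩, (L.length : Int) + 1) := by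
      simp [pvStateOf, PySem.List.enumerate_append, PySem.List.enumerate_cons,
        PySem.List.enumerate_nil]
    rw [hadd, e3]
    simp only [pvStep1, hd1, e1, e2]
    rfl

lemma pv_foldA (gd : List (Int × Int × Int)) :
    ∀ L : List Int,
      gd.foldl (fun st x => pvStep1 (pvStep1 st x.1) x.2.1) (pvStateOf L)
        = pvStateOf ((gd.flatMap (fun x => [x.1, x.2.1])).foldl PySem.Set.add L) := by
  induction gd with
  | nil => intro L; simp
  | cons x xs ih =>
    intro L
    simp only [List.foldl_cons, List.flatMap_cons, List.foldl_append,
      pv_step1_stateOf, ih]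
    simp [List.foldl]

lemma pv_foldB_fwd (u : List Int) :
    ∀ (s : Int) (acc : List (Int × Int)),
      (∀ x ∈ u, (acc.any (fun p => p.1 == x)) = false) → u.Nodup →
      (PySem.List.enumerate u s).foldl
          (fun (d : PySem.Dict Int Int) (p : Int × Int) => d.insert p.2 p.1) ⟨acc⟩
        = ⟨acc ++ (PySem.List.enumerate u s).map (fun p => (p.2, p.1))⟩ := by
  induction u with
  | nil => intro s acc _ _; simp [PySem.List.enumerate_nil]
  | cons x xs ih =>
    intro s acc hacc hnd
    have hx : (acc.any (fun p => p.1 == x)) = false := hacc x (by simp)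
    simp only [PySem.List.enumerate_cons, List.foldl_cons]
    have hins : (PySem.Dict.mk acc).insert x s = ⟨acc ++ [(x, s)]⟩ := by
      simp [PySem.Dict.insert, PySem.Dict.contains_mk, hx]
    rw [hins, ih (s + 1) (acc ++ [(x, s)])]
    · simp
    · intro y hy
      have hyx : (x == y) = false := by
        rcases List.nodup_cons.1 hnd with ⟨hxn, _⟩
        by_cases e : x = y
        · subst e; exact (hxn hy).elim
        · simpa using e
      simp [List.any_append, hacc y (by simp [hy]), hyx]
    · exact (List.nodup_cons.1 hnd).2

lemma pv_foldB_rev (u : List Int) :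
    ∀ (s : Int) (acc : List (Int × Int)),
      (∀ p ∈ acc, p.1 < s) →
      (PySem.List.enumerate u s).foldl
          (fun (d : PySem.Dict Int Int) (p : Int × Int) => d.insert p.1 p.2) ⟨acc⟩
        = ⟨acc ++ PySem.List.enumerate u s⟩ := by
  induction u with
  | nil => intro s acc _; simp [PySem.List.enumerate_nil]
  | cons x xs ih =>
    intro s acc hacc
    simp only [PySem.List.enumerate_cons, List.foldl_cons]
    have hs : (acc.any (fun p => p.1 == s)) = false := by
      simp only [List.any_eq_false]
      intro p hp
      have := hacc p hp
      simp only [beq_iff_eq]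
      omega
    have hins : (PySem.Dict.mk acc).insert s x = ⟨acc ++ [(s, x)]⟩ := by
      simp [PySem.Dict.insert, PySem.Dict.contains_mk, hs]
    rw [hins, ih (s + 1) (acc ++ [(s, x)])]
    · simp
    · intro p hp
      rcases List.mem_append.1 hp with h | h
      · have := hacc p h; omega
      · simp only [List.mem_singleton] at h
        subst h
        show s < s + 1
        omega

-- ===== VERDICT (by name: the statement is the Claim_ definition above) =====
theorem build_graph_dict_spec : Claim_equal_build_graph_dict := by
  intro gd _
  unfold Spec_build_graph_dict build_graph_dict build_graph_dict_alt
  have hA := pv_foldA gd []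
  have h0 : pvStateOf [] = (PySem.Dict.empty, PySem.Dict.empty, 0) := by
    simp [pvStateOf, PySem.List.enumerate_nil, PySem.Dict.empty]
  rw [h0] at hA
  set labels := gd.flatMap (fun x => [x.1, x.2.1]) with hlab
  have hU : labels.foldl PySem.Set.add [] = PySem.List.dedup labels := rfl
  rw [hU] at hA
  have hemp0 : (PySem.Dict.empty : PySem.Dict Int Int) = ⟨[]⟩ := rfl
  rw [hemp0] at hA
  have hnd : (PySem.List.dedup labels).Nodup := PySem.List.nodup_dedup labels
  have hF := pv_foldB_fwd (PySem.List.dedup labels) 0 [] (by simp) hnd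
  have hR := pv_foldB_rev (PySem.List.dedup labels) 0 [] (by simp)
  simp only [hemp0, hA, hF, hR]
  simp [pvStateOf]
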